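-- pv_equiv track=rewrite | github.com/karishmatank/ls-core | py-110/other_practice/spot_practice.py | solve
-- ===== SOURCE A (Python) =====
-- VOWELS = 'aeiou'
--
-- def solve(string):
--     longest_count = 0
--     current_count = 0
--     for char in string:
--         if char in VOWELS:
--             current_count += 1
--         else:
--             current_count = 0
--         longest_count = max(longest_count, current_count)
--     return longest_count
-- ===== SOURCE B (Python) =====
-- VOWELS = 'aeiou'
--
-- def solve(string):
--     # Scan run-by-run: consume each maximal vowel run whole, keep the best length.
--     best = 0
--     rest = string
--     while rest:
--         if rest[0] in VOWELS:
--             run = 0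
--             while rest and rest[0] in VOWELS:
--                 run += 1
--                 rest = rest[1:]
--             best = max(best, run)
--         else:
--             rest = rest[1:]
--     return best
-- ===== Notes on version B (the rewrite author's own statement) =====
-- stated objective: alternative
-- what changed: B replaces A's single pass carrying per-character running/best counters with a run-based outer loop that consumes each maximal vowel run whole (an inner scan) and reduces over the run lengths.
import Mathlib
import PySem

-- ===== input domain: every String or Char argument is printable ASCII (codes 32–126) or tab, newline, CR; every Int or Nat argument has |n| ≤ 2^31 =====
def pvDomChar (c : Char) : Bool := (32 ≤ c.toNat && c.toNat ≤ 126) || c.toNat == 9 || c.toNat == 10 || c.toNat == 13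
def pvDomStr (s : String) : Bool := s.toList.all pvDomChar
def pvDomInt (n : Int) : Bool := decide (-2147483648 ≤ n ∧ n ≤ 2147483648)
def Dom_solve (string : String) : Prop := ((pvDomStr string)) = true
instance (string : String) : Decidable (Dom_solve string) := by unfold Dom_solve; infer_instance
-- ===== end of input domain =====

-- B replaces A's per-character running/best counters with a run-based scan that
-- consumes each maximal vowel run whole (objective: alternative decomposition).


-- shared helper: the Python test `c in VOWELS` (substring membership of a 1-char string)
def isVowel (c : Char) : Bool := PySem.Chars.isIn [c] "aeiou".toList

-- ===== PORT A =====
def solve (string : String) : Int :=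
  (string.toList.foldl
    (fun st char =>
      let current_count : Int := if isVowel char then st.2 + 1 else 0
      (max st.1 current_count, current_count))
    ((0 : Int), (0 : Int))).1

-- ===== PORT B =====
-- inner `while rest and rest[0] in VOWELS` loop: returns (run length, remaining rest)
def vowelRun : List Char → Nat × List Char
  | [] => (0, [])
  | c :: cs => if isVowel c then let p := vowelRun cs; (p.1 + 1, p.2) else (0, c :: cs)

theorem vowelRun_eq (l : List Char) :
    vowelRun l = ((l.takeWhile isVowel).length, l.dropWhile isVowel) := by
  induction l with
  | nil => rfl
  | cons c cs ih =>
    by_cases h : isVowel c = true <;> simp [vowelRun, h, ih]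

-- outer `while rest` loop
def solveAltGo : List Char → Int → Int
  | [], best => best
  | c :: cs, best =>
    if isVowel c then
      let p := vowelRun (c :: cs)
      solveAltGo p.2 (max best (p.1 : Int))
    else
      solveAltGo cs best
  termination_by l _ => l.length
  decreasing_by
  · simp only [vowelRun_eq]
    have := List.length_dropWhile_le (p := isVowel) (l := cs)
    simp [*]
  · simp

def solve_alt (string : String) : Int := solveAltGo string.toList 0

-- ===== PRECONDITION & SPEC =====
def Spec_solve (string : String) (out : Int) : Prop := out = solve_alt string
instance (string : String) (out : Int) : Decidable (Spec_solve string out) := by unfold Spec_solve; infer_instance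

-- ===== CLAIM (what is proved, stated in full; the proofs are below) =====
def Claim_equal_solve : Prop := ∀ (string : String), Dom_solve string → Spec_solve string (solve string)

-- ===== LEMMAS AND PROOFS =====

theorem head_dropWhile_false {α : Type} (p : α → Bool) :
    ∀ (l : List α) (d : α) (ds : List α), l.dropWhile p = d :: ds → p d = false := by
  intro l
  induction l with
  | nil => intro d ds h; simp at h
  | cons c cs ih =>
    intro d ds h
    by_cases hc : p c = true
    · exact ih d ds (by simpa [List.dropWhile_cons, hc] using h)
    · rw [List.dropWhile_cons] at h
      simp only [hc] at h
      simp only [Bool.false_eq_true, if_false, List.cons.injEq] at h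
      rw [← h.1]
      simpa using hc

-- A's loop as a standalone recursion over (longest, current)
def aGo : List Char → Int → Int → Int
  | [], longest, _ => longest
  | c :: cs, longest, cur =>
    let cur' : Int := if isVowel c then cur + 1 else 0
    aGo cs (max longest cur') cur'

theorem foldl_eq_aGo (l : List Char) (longest cur : Int) :
    (l.foldl
      (fun st char =>
        let current_count : Int := if isVowel char then st.2 + 1 else 0
        (max st.1 current_count, current_count))
      (longest, cur)).1 = aGo l longest cur := by
  induction l generalizing longest cur with
  | nil => rfl
  | cons c cs ih => simp [aGo, List.foldl_cons, ih]

-- running A's loop across a maximal vowel run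
theorem aGo_run (l : List Char) (longest cur : Int)
    (hc : 0 ≤ cur) (hlc : cur ≤ longest) :
    aGo l longest cur =
      aGo (l.dropWhile isVowel)
        (max longest (cur + (l.takeWhile isVowel).length))
        (cur + (l.takeWhile isVowel).length) := by
  induction l generalizing longest cur with
  | nil =>
    simp [aGo]
    omega
  | cons c cs ih =>
    by_cases h : isVowel c = true
    · rw [show aGo (c :: cs) longest cur = aGo cs (max longest (cur + 1)) (cur + 1) by
        simp [aGo, h]]
      rw [ih (max longest (cur + 1)) (cur + 1) (by omega) (by omega)]
      simp [h]
      congr 1 <;> [skip; omega]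
      congr 1
      omega
    · simp only [List.takeWhile_cons, h, Bool.false_eq_true,
        if_false, List.dropWhile_cons, List.length_nil, Int.natCast_zero, add_zero]
      rw [max_eq_left hlc]

theorem aGo_eq_solveAltGo (l : List Char) (best : Int) (hb : 0 ≤ best) :
    aGo l best 0 = solveAltGo l best := by
  induction hn : l.length using Nat.strong_induction_on generalizing l best with
  | _ n ih =>
  have hn' : l.length = n := hn
  match l with
  | [] => simp [aGo, solveAltGo]
  | c :: cs =>
    by_cases h : isVowel c = true
    · rw [aGo_run (c :: cs) best 0 le_rfl hb]
      rw [show solveAltGo (c :: cs) best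
            = solveAltGo (vowelRun (c :: cs)).2 (max best ((vowelRun (c :: cs)).1 : Int)) by
          simp [solveAltGo, h]]
      rw [vowelRun_eq]
      simp only [zero_add]
      set rest := (c :: cs).dropWhile isVowel with hrest
      have hlen : rest.length < n := by
        have h1 := List.length_dropWhile_le (p := isVowel) (l := cs)
        have h2 : cs.length + 1 = n := by simpa using hn
        simp [hrest, h]
        omega
      match hr : rest with
      | [] => simp [aGo, solveAltGo]
      | d :: ds =>
        have hd : isVowel d = false :=
          head_dropWhile_false isVowel (c :: cs) d ds hrest.symm
        rw [show aGo (d :: ds) (max best ((c :: cs).takeWhile isVowel).length)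
              ((c :: cs).takeWhile isVowel).length
            = aGo ds (max (max best ((c :: cs).takeWhile isVowel).length) 0) 0 by
          simp [aGo, hd]]
        rw [show (max (max best (((c :: cs).takeWhile isVowel).length : Int)) 0)
              = max best (((c :: cs).takeWhile isVowel).length : Int) by omega]
        rw [show solveAltGo (d :: ds) (max best (((c :: cs).takeWhile isVowel).length : Int))
              = solveAltGo ds (max best (((c :: cs).takeWhile isVowel).length : Int)) by
          simp [solveAltGo, hd]]
        exact ih ds.length (by simp at hlen; omega) ds _ (by omega) rfl
    · rw [show aGo (c :: cs) best 0 = aGo cs (max best 0) 0 by simp [aGo, h]]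
      rw [show max best (0 : Int) = best by omega]
      rw [show solveAltGo (c :: cs) best = solveAltGo cs best by simp [solveAltGo, h]]
      exact ih cs.length (by simp only [List.length_cons] at hn; omega) cs best hb rfl

-- ===== VERDICT (by name: the statement is the Claim_ definition above) =====
theorem solve_spec : Claim_equal_solve := by
  intro string _
  unfold Spec_solve solve solve_alt
  rw [foldl_eq_aGo]
  exact aGo_eq_solveAltGo _ 0 le_rfl
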